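-- pv_equiv track=rewrite | github.com/drothermel/dr_gen | src/dr_gen/analyze/bootstrapping.py | get_min_2d_data_shape
-- ===== SOURCE A (Python) =====
-- import math
--
-- def get_min_2d_data_shape(data_dict):
--     """Takes { exp_name: list_of_lists }.
--
--     Finds the minimum lengths of outer (R) and inner (T) lists.
--     Returns (min_R, min_T) or None if empty dict/lists found.
--     """
--     if not data_dict:
--         return None
--     min_first = math.inf  # Will hold min_R
--     min_second = math.inf  # Will hold min_T
--     for outer_list in data_dict.values():
--         if not outer_list:
--             return None  # Check runs list
--         min_first = min(min_first, len(outer_list))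
--         for inner_list in outer_list:
--             if not inner_list:
--                 return None  # Check timesteps list
--             min_second = min(min_second, len(inner_list))
--     # Safeguard: Ensure minimums were actually found
--     if math.inf in (min_first, min_second):
--         return None
--     return (int(min_first), int(min_second))  # (min_R, min_T)
-- ===== SOURCE B (Python) =====
-- def get_min_2d_data_shape(data_dict):
--     """Takes { exp_name: list_of_lists }.
--
--     Finds the minimum lengths of outer (R) and inner (T) lists.
--     Returns (min_R, min_T) or None if empty dict/lists found.
--     """
--     if not data_dict:
--         return None
--     outers = list(data_dict.values())
--     if any(not o for o in outers):
--         return None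
--     min_R = min(len(o) for o in outers)
--     inners = [i for o in outers for i in o]
--     if any(not i for i in inners):
--         return None
--     min_T = min(len(i) for i in inners)
--     return (min_R, min_T)
-- ===== Notes on version B (the rewrite author's own statement) =====
-- stated objective: simpler
-- what changed: Replaces A's single fused loop with inf-sentinel accumulators and a final inf safeguard by separate whole-structure passes: an emptiness check and min over the outer lists, then a flatten and an emptiness check and min over all inner lists, with plain len-based mins and no sentinel.
import Mathlib
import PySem

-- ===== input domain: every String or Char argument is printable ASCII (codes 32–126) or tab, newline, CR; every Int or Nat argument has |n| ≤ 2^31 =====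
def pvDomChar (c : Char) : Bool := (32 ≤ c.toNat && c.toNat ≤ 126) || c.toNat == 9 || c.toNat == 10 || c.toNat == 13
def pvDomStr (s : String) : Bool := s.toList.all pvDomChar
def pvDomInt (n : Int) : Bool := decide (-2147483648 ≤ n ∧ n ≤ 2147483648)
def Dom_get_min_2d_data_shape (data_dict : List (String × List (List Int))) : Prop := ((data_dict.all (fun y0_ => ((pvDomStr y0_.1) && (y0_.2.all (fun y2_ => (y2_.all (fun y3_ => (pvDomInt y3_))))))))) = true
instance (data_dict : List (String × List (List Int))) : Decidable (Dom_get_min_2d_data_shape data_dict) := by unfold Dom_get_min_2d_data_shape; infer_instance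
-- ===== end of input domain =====

-- B: separate passes (emptiness checks, flatten, plain mins) instead of a fused sentinel loop; simpler.
-- ===== PORT A =====
def pvMinOpt (m : Option Int) (v : Int) : Option Int :=
  some (match m with | none => v | some x => min x v)

-- inner 'for inner_list in outer_list' loop: none = early 'return None'
def pvInnerA : List (List Int) → Option Int → Option (Option Int)
  | [], m2 => some m2
  | l :: rest, m2 => if l = [] then none else pvInnerA rest (pvMinOpt m2 (l.length : Int))

-- outer 'for outer_list in data_dict.values()' loop
def pvOuterA : List (List (List Int)) → Option Int → Option Int → Option (Option Int × Option Int)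
  | [], m1, m2 => some (m1, m2)
  | o :: rest, m1, m2 =>
    if o = [] then none
    else
      match pvInnerA o m2 with
      | none => none
      | some m2' => pvOuterA rest (pvMinOpt m1 (o.length : Int)) m2'

def get_min_2d_data_shape (data_dict : List (String × List (List Int))) : Option (Int × Int) :=
  if data_dict = [] then none
  else
    match pvOuterA (data_dict.map Prod.snd) none none with
    | none => none
    | some (m1, m2) =>
      -- 'if math.inf in (min_first, min_second): return None'
      match m1, m2 with
      | some a, some b => some (a, b)
      | _, _ => none

-- ===== PORT B =====
def get_min_2d_data_shape_alt (data_dict : List (String × List (List Int))) : Option (Int × Int) :=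
  if data_dict = [] then none
  else if (data_dict.map Prod.snd).any (fun o => o = []) then none
  else
    -- min(len(o) for o in outers): Python's min as fold over a nonempty list
    match (data_dict.map Prod.snd).map (fun o => (o.length : Int)) with
    | [] => none  -- unreachable (data_dict nonempty); totality guard only
    | r :: rs =>
      -- inners = flatten of the outer lists
      if ((data_dict.map Prod.snd).flatMap id).any (fun i => i = []) then none
      else
        match ((data_dict.map Prod.snd).flatMap id).map (fun i => (i.length : Int)) with
        | [] => none  -- unreachable (every outer nonempty); totality guard only
        | t :: ts => some (rs.foldl min r, ts.foldl min t)

-- ===== PRECONDITION & SPEC =====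
def Spec_get_min_2d_data_shape (data_dict : List (String × List (List Int))) (out : Option (Int × Int)) : Prop := out = get_min_2d_data_shape_alt data_dict
instance (data_dict : List (String × List (List Int))) (out : Option (Int × Int)) : Decidable (Spec_get_min_2d_data_shape data_dict out) := by unfold Spec_get_min_2d_data_shape; infer_instance

-- ===== CLAIM (what is proved, stated in full; the proofs are below) =====
def Claim_equal_get_min_2d_data_shape : Prop := ∀ (data_dict : List (String × List (List Int))), Dom_get_min_2d_data_shape data_dict → Spec_get_min_2d_data_shape data_dict (get_min_2d_data_shape data_dict)


-- ===== LEMMAS AND PROOFS =====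
theorem pvInnerA_eq (o : List (List Int)) (m : Option Int) :
    pvInnerA o m =
      if [] ∈ o then none
      else some (o.foldl (fun a l => pvMinOpt a (l.length : Int)) m) := by
  induction o generalizing m with
  | nil => simp [pvInnerA]
  | cons l rest ih =>
    by_cases hl : l = []
    · simp [pvInnerA, hl]
    · simp [pvInnerA, hl, ih]

theorem pvOuterA_eq (os : List (List (List Int))) (m1 m2 : Option Int) :
    pvOuterA os m1 m2 =
      if ([] ∈ os ∨ ∃ x ∈ os, [] ∈ x) then none
      else some (os.foldl (fun a o => pvMinOpt a (o.length : Int)) m1,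
                 (os.flatMap id).foldl (fun a l => pvMinOpt a (l.length : Int)) m2) := by
  induction os generalizing m1 m2 with
  | nil => simp [pvOuterA]
  | cons o rest ih =>
    by_cases ho : o = []
    · simp [pvOuterA, ho]
    · rw [pvOuterA, if_neg ho, pvInnerA_eq]
      by_cases hi : [] ∈ o
      · simp [hi]
      · rw [if_neg hi]
        dsimp only
        rw [ih]
        by_cases hr : [] ∈ rest ∨ ∃ x ∈ rest, [] ∈ x
        · rw [if_pos hr, if_pos]
          rcases hr with h | ⟨x, hx, hx2⟩
          · exact Or.inl (List.mem_cons_of_mem _ h)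
          · exact Or.inr ⟨x, List.mem_cons_of_mem _ hx, hx2⟩
        · rw [if_neg hr, if_neg, List.flatMap_cons, List.foldl_append]
          · rfl
          · rintro (h | ⟨x, hx, hx2⟩)
            · rcases List.mem_cons.mp h with h | h
              · exact ho h.symm
              · exact hr (Or.inl h)
            · rcases List.mem_cons.mp hx with h | h
              · exact hi (h ▸ hx2)
              · exact hr (Or.inr ⟨x, h, hx2⟩)

theorem pvFoldMinSome {α : Type} (f : α → Int) (xs : List α) (v : Int) :
    xs.foldl (fun a l => pvMinOpt a (f l)) (some v) =
      some ((xs.map f).foldl min v) := by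
  induction xs generalizing v with
  | nil => simp
  | cons x rest ih =>
    rw [List.foldl_cons, show pvMinOpt (some v) (f x) = some (min v (f x)) from rfl,
       ih, List.map_cons, List.foldl_cons]

theorem pvFoldMinNone {α : Type} (f : α → Int) (x : α) (xs : List α) :
    (x :: xs).foldl (fun a l => pvMinOpt a (f l)) none =
      some ((xs.map f).foldl min (f x)) := by
  rw [List.foldl_cons, show pvMinOpt none (f x) = some (f x) from rfl, pvFoldMinSome]

-- ===== VERDICT (by name: the statement is the Claim_ definition above) =====
theorem get_min_2d_data_shape_spec : Claim_equal_get_min_2d_data_shape := by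
  intro d _
  unfold Spec_get_min_2d_data_shape get_min_2d_data_shape get_min_2d_data_shape_alt
  by_cases hd : d = []
  · simp [hd]
  · have hne : d.map Prod.snd ≠ [] := by simp [hd]
    obtain ⟨o, rest, hos⟩ := List.exists_cons_of_ne_nil hne
    simp only [if_neg hd]
    rw [pvOuterA_eq, hos]
    by_cases h1 : [] ∈ o :: rest
    · have hany : ((o :: rest).any (fun o => o = [])) = true := by
        rw [List.any_eq_true]
        exact ⟨[], h1, by simp⟩
      rw [if_pos (Or.inl h1), if_pos hany]
    · have h1' : ((o :: rest).any (fun o => o = [])) = false := by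
        rw [List.any_eq_false]
        intro x hx h
        rw [decide_eq_true_eq] at h
        exact h1 (h ▸ hx)
      have ho : o ≠ [] := fun h => h1 (by simp [h])
      obtain ⟨i, is, hoi⟩ := List.exists_cons_of_ne_nil ho
      by_cases h2 : ∃ x ∈ o :: rest, [] ∈ x
      · have hB : (((o :: rest).flatMap id).any (fun i => i = [])) = true := by
          rw [List.any_eq_true]
          obtain ⟨x, hx, hx2⟩ := h2
          exact ⟨[], List.mem_flatMap.mpr ⟨x, hx, hx2⟩, by simp⟩
        rw [if_pos (Or.inr h2), if_neg (by rw [h1']; simp), List.map_cons]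
        dsimp only
        rw [if_pos hB]
      · have hB2 : (((o :: rest).flatMap id).any (fun i => i = [])) = false := by
          rw [List.any_eq_false]
          intro x hx h
          rw [decide_eq_true_eq] at h
          subst h
          rcases List.mem_flatMap.mp hx with ⟨y, hy, hxy⟩
          exact h2 ⟨y, hy, hxy⟩
        rw [if_neg (fun h => h.elim h1 h2), if_neg (by rw [h1']; simp), List.map_cons]
        dsimp only
        rw [if_neg (by rw [hB2]; simp)]
        rw [pvFoldMinNone (fun o : List (List Int) => (o.length : Int)) o rest, hoi,
            List.flatMap_cons, id_eq, List.cons_append,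
            pvFoldMinNone (fun l : List Int => (l.length : Int)) i (is ++ rest.flatMap id),
            List.map_cons]
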